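-- pv_equiv track=rewrite | github.com/pypi-data/pypi-mirror-280 | packages/netbone/netbone-0.2.3.tar.gz/netbone-0.2.3/netbone/hybrid/glanb.py | count_included_subarrays
-- ===== SOURCE A (Python) =====
-- def count_included_subarrays(arrays, target_array):
--     count = 0
--     target_len = len(target_array)
--     for array in arrays:
--         array_len = len(array)
--         for i in range(array_len - target_len + 1):
--             if array[i:i + target_len] == target_array:
--                 count += 1
--     return count
-- ===== SOURCE B (Python) =====
-- def _step(t, fail, q, x):
--     # advance the KMP automaton from state q on symbol x
--     while q > 0 and x != t[q]:
--         q = fail[q]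
--     if x == t[q]:
--         q += 1
--     return q
--
--
-- def count_included_subarrays(arrays, target_array):
--     # KMP: one pass per array carrying q = length of the longest prefix of the
--     # target that is a suffix of the elements read so far; overlapping matches
--     # are kept by falling back to the target's longest proper border.
--     t = target_array
--     m = len(t)
--     if m == 0:
--         return sum(len(a) + 1 for a in arrays)
--     # failure table: fail[j] = length of the longest proper border of t[:j]
--     fail = [0] * (m + 1)
--     q = 0
--     for j in range(1, m):
--         q = _step(t, fail, q, t[j])
--         fail[j + 1] = q
--     total = 0
--     for array in arrays:
--         q = 0
--         for x in array:
--             q = _step(t, fail, q, x)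
--             if q == m:
--                 total += 1
--                 q = fail[m]
--     return total
-- ===== Notes on version B (the rewrite author's own statement) =====
-- stated objective: alternative
-- what changed: Replaces A's restart-at-every-index slice comparison by KMP pattern matching: B precomputes the failure table (longest proper border of each target prefix) and scans each array once, carrying the length of the longest target-prefix that is a suffix of the elements read so far, falling back through the table on mismatch and after each full match (overlaps kept).
import Mathlib
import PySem

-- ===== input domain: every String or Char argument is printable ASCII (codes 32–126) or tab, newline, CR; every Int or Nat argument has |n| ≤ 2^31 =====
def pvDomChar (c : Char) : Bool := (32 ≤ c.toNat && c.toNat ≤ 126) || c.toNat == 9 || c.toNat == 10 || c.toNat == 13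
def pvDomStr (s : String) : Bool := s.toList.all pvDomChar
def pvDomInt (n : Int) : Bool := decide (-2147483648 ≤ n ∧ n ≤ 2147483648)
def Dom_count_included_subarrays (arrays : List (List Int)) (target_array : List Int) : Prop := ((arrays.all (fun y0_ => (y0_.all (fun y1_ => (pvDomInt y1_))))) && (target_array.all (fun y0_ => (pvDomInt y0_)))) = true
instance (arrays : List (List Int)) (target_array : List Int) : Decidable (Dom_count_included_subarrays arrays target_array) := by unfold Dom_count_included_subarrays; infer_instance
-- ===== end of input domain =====

-- B replaces A's restart-at-every-index slice comparison by KMP: a precomputed failure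
-- table and one pass per array carrying the length of the longest target-prefix that is a
-- suffix of the elements read so far (objective: alternative algorithm).

-- ===== PORT A =====
def count_included_subarrays (arrays : List (List Int)) (target_array : List Int) : Int :=
  let target_len := PySem.List.len target_array
  arrays.foldl (fun count array =>
    let array_len := PySem.List.len array
    (PySem.List.pyRange 0 (array_len - target_len + 1) 1).foldl
      (fun count i =>
        if PySem.List.slice array (some i) (some (i + target_len)) = target_array
        then count + 1 else count)
      count) 0

-- ===== PORT B =====
-- port of Source B's `_step(t, fail, q, x)`. All indices and states are nonnegative Python
-- ints, ported as Nat; Python's t[q]/t[j] (every access has 0 ≤ index < len(t)) is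
-- t.getD _ 0. The while loop strictly decreases q (the failure table has fail[q] < q),
-- so it exits within q iterations; it is ported with a fuel parameter, always called
-- with fuel = q + 1, so the fuel-exhausted arm is never reached on the calls made below.
def pyStep (t : List Int) (fail : List Nat) (x : Int) : Nat → Nat → Nat
  | 0, q => q
  | fuel+1, q =>
    if 0 < q ∧ x ≠ t.getD q 0 then pyStep t fail x fuel (fail.getD q 0)
    else if x = t.getD q 0 then q + 1 else q

def count_included_subarrays_alt (arrays : List (List Int)) (target_array : List Int) : Int :=
  let t := target_array
  let m := t.length
  if m = 0 then (arrays.map (fun a => PySem.List.len a + 1)).sum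
  else
    -- fail = [0]*(m+1); q = 0; for j in range(1, m): q = _step(t, fail, q, t[j]); fail[j+1] = q
    let pre := (List.range' 1 (m-1)).foldl (fun (st : List Nat × Nat) j =>
        let q := pyStep t st.1 (t.getD j 0) (st.2 + 1) st.2
        (st.1.set (j+1) q, q)) (List.replicate (m+1) 0, 0)
    let fail := pre.1
    arrays.foldl (fun total array =>
      (array.foldl (fun (st : Int × Nat) x =>
          let q := pyStep t fail x (st.2 + 1) st.2
          if q = m then (st.1 + 1, fail.getD m 0) else (st.1, q))
        (total, 0)).1) 0

-- ===== PRECONDITION & SPEC =====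
def Spec_count_included_subarrays (arrays : List (List Int)) (target_array : List Int) (out : Int) : Prop := out = count_included_subarrays_alt arrays target_array
instance (arrays : List (List Int)) (target_array : List Int) (out : Int) : Decidable (Spec_count_included_subarrays arrays target_array out) := by unfold Spec_count_included_subarrays; infer_instance

-- ===== CLAIM (what is proved, stated in full; the proofs are below) =====
def Claim_equal_count_included_subarrays : Prop := ∀ (arrays : List (List Int)) (target_array : List Int), Dom_count_included_subarrays arrays target_array → Spec_count_included_subarrays arrays target_array (count_included_subarrays arrays target_array)

-- ===== LEMMAS AND PROOFS =====

-- specification twin of pyExtend: largest k ≤ cap with (t.take k) a suffix of p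
def bm (t p : List Int) : Nat → Nat
  | 0 => 0
  | k+1 => if t.take (k+1) <:+ p then k+1 else bm t p k

theorem suffix_of_suffix_len (u v l : List Int) (h1 : u <:+ l) (h2 : v <:+ l)
    (h : u.length ≤ v.length) : u <:+ v := by
  rw [List.suffix_iff_eq_drop] at h1 h2
  have hv : v.length ≤ l.length := by
    have := congrArg List.length h2; simp at this; omega
  rw [h1, h2]
  rw [show l.length - u.length = (l.length - v.length) + (v.length - u.length) by omega]
  rw [← List.drop_drop]
  exact List.drop_suffix ..

theorem suffix_append_single (u p : List Int) (x : Int) (h : u <:+ p) :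
    u ++ [x] <:+ p ++ [x] := by
  obtain ⟨w, rfl⟩ := h; exact ⟨w, by simp⟩

theorem bm_le (t p : List Int) (c : Nat) : bm t p c ≤ c := by
  induction c with
  | zero => simp [bm]
  | succ c ih => unfold bm; split <;> omega

theorem bm_suffix (t p : List Int) (c : Nat) : t.take (bm t p c) <:+ p := by
  induction c with
  | zero => simp [bm]
  | succ c ih => unfold bm; split <;> simp_all

theorem bm_ge (t p : List Int) (c k : Nat) (hk : k ≤ c) (h : t.take k <:+ p) :
    k ≤ bm t p c := by
  induction c with
  | zero => omega
  | succ c ih =>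
    unfold bm; split
    · omega
    · rename_i hc
      rcases Nat.lt_or_ge k (c+1) with h' | h'
      · exact ih (by omega)
      · exact absurd (by rwa [show k = c + 1 by omega] at h) hc

theorem bm_congr (t p p' : List Int) (c : Nat)
    (h : ∀ k, 1 ≤ k → k ≤ c → (t.take k <:+ p ↔ t.take k <:+ p')) :
    bm t p c = bm t p' c := by
  induction c with
  | zero => rfl
  | succ c ih =>
    unfold bm
    rw [if_congr (h (c+1) (by omega) (by omega)) rfl rfl,
        ih (fun k h1 h2 => h k h1 (by omega))]

theorem bm_ne_top (t p : List Int) (c : Nat) (h : bm t p (c+1) ≠ c+1) :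
    bm t p (c+1) = bm t p c := by
  by_cases hc : t.take (c+1) <:+ p
  · exact absurd (by simp [bm, hc]) h
  · simp [bm, hc]

theorem bm_eq_top_iff (t p : List Int) (c : Nat) : bm t p c = c ↔ t.take c <:+ p := by
  constructor
  · intro h; have := bm_suffix t p c; rwa [h] at this
  · intro h; exact Nat.le_antisymm (bm_le ..) (bm_ge _ _ _ _ le_rfl h)

theorem bm_nil (t : List Int) (ht : t ≠ []) (c : Nat) : bm t [] c = 0 := by
  induction c with
  | zero => rfl
  | succ c ih =>
    unfold bm
    rw [if_neg, ih]
    intro h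
    have := List.eq_nil_of_suffix_nil h
    rw [List.take_eq_nil_iff] at this
    rcases this with h' | h' <;> simp_all

-- fail[j] in Source B: the longest proper border of t[:j], as a bm value
def brd (t : List Int) (j : Nat) : Nat := bm t ((t.take j).drop 1) (t.length - 1)

theorem take_snoc (t : List Int) (j : Nat) (hj : j < t.length) :
    t.take (j+1) = t.take j ++ [t[j]] := by
  rw [List.take_add_one]; simp [List.getElem?_eq_getElem hj]

-- a target-prefix that is a suffix of p ++ [x] ends in x and drops to a suffix of p
theorem take_suffix_snoc (t p : List Int) (x : Int) (j : Nat) (hj : j < t.length)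
    (h : t.take (j+1) <:+ p ++ [x]) : t[j] = x ∧ t.take j <:+ p := by
  obtain ⟨w, hw⟩ := h
  rw [take_snoc t j hj, ← List.append_assoc] at hw
  obtain ⟨hw1, hw2⟩ := List.append_inj' hw rfl
  exact ⟨by simpa using hw2, ⟨w, hw1⟩⟩

-- the invariant fed to the automaton step: every candidate is at most q + 1
theorem hb_of_bm (t p : List Int) (x : Int) :
    ∀ k, 1 ≤ k → k ≤ t.length → t.take k <:+ p ++ [x] →
    k ≤ bm t p (t.length - 1) + 1 := by
  intro k h1 h2 h
  obtain ⟨-, hsuf⟩ := take_suffix_snoc t p x (k-1) (by omega)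
    (by rwa [show k - 1 + 1 = k by omega])
  have := bm_ge t p (t.length - 1) (k-1) (by omega) hsuf
  omega

-- correctness of Source B's `_step`: from the longest-border state for p it computes the
-- longest-border state for p ++ [x]
theorem pyStep_spec (t : List Int) (F : List Nat) (p : List Int) (x : Int) (ht : t ≠ []) :
    ∀ (fuel q : Nat), q < fuel →
    (∀ j, 1 ≤ j → j ≤ q → F.getD j 0 = brd t j) →
    t.take q <:+ p → q ≤ t.length - 1 →
    (∀ k, 1 ≤ k → k ≤ t.length → t.take k <:+ p ++ [x] → k ≤ q + 1) →
    pyStep t F x fuel q = bm t (p ++ [x]) t.length := by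
  have hm : 1 ≤ t.length := by cases t <;> simp_all
  intro fuel
  induction fuel with
  | zero => omega
  | succ f ih =>
    intro q hqf hF ha hqle hb
    simp only [pyStep]
    by_cases hcond : 0 < q ∧ x ≠ t.getD q 0
    · rw [if_pos hcond]
      obtain ⟨hq1, hx⟩ := hcond
      have hqm : q < t.length := by omega
      have hbsuf : t.take (brd t q) <:+ (t.take q).drop 1 := bm_suffix ..
      have hble : brd t q ≤ t.length - 1 := bm_le ..
      have hblen : brd t q ≤ q - 1 := by
        have h := hbsuf.length_le
        simp only [List.length_take, List.length_drop] at h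
        omega
      have ha' : t.take (brd t q) <:+ p :=
        (hbsuf.trans (List.drop_suffix 1 _)).trans ha
      have hb' : ∀ k, 1 ≤ k → k ≤ t.length → t.take k <:+ p ++ [x] →
          k ≤ brd t q + 1 := by
        intro k h1 h2 h
        have hk1 : k ≤ q + 1 := hb k h1 h2 h
        have hkq : k ≤ q := by
          by_contra h'
          have hk : k = q + 1 := by omega
          obtain ⟨hlast, -⟩ := take_suffix_snoc t p x q hqm (by rwa [hk] at h)
          rw [List.getD_eq_getElem t 0 hqm] at hx
          exact hx hlast.symm
        obtain ⟨-, hsuf⟩ := take_suffix_snoc t p x (k-1) (by omega)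
          (by rwa [show k - 1 + 1 = k by omega])
        have h1' : t.take (k-1) <:+ t.take q :=
          suffix_of_suffix_len _ _ _ hsuf ha (by simp; omega)
        have h2' : t.take (k-1) <:+ (t.take q).drop 1 :=
          suffix_of_suffix_len _ _ _ h1' (List.drop_suffix 1 _) (by simp; omega)
        have := bm_ge t ((t.take q).drop 1) (t.length - 1) (k-1) (by omega) h2'
        have hbd : brd t q = bm t ((t.take q).drop 1) (t.length - 1) := rfl
        omega
      rw [hF q hq1 le_rfl]
      exact ih (brd t q) (by omega) (fun j hj1 hj2 => hF j hj1 (by omega)) ha'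
        (by omega) hb'
    · rw [if_neg hcond]
      by_cases hx : x = t.getD q 0
      · rw [if_pos hx]
        have hqm : q < t.length := by omega
        have hup : t.take (q+1) <:+ p ++ [x] := by
          rw [take_snoc t q hqm,
              show t[q] = x from by rw [hx, List.getD_eq_getElem t 0 hqm]]
          exact suffix_append_single _ _ _ ha
        apply Nat.le_antisymm
        · exact bm_ge t (p ++ [x]) _ _ (by omega) hup
        · rcases Nat.eq_zero_or_pos (bm t (p ++ [x]) t.length) with h0 | hpos
          · omega
          · exact hb _ hpos (bm_le ..) (bm_suffix ..)
      · rw [if_neg hx]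
        have hq0 : q = 0 := by
          by_contra h'
          exact hcond ⟨by omega, hx⟩
        subst hq0
        rcases Nat.eq_zero_or_pos (bm t (p ++ [x]) t.length) with h0 | hpos
        · omega
        · exfalso
          have h1 := hb _ hpos (bm_le ..) (bm_suffix ..)
          have hbm1 : bm t (p ++ [x]) t.length = 1 := by omega
          have hs := bm_suffix t (p ++ [x]) t.length
          rw [hbm1] at hs
          obtain ⟨hlast, -⟩ := take_suffix_snoc t p x 0 (by omega) hs
          exact hx (by rw [List.getD_eq_getElem t 0 (by omega)]; exact hlast.symm)

-- after a full match, restarting from the longest proper border of t is exact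
theorem bm_reset (t p' : List Int) (ht : t ≠ []) (h : t <:+ p') :
    bm t p' (t.length - 1) = bm t (t.drop 1) (t.length - 1) := by
  apply bm_congr
  intro k h1 h2
  have hm : 1 ≤ t.length := by cases t <;> simp_all
  have hkt : (t.take k).length = k := by simp; omega
  constructor
  · intro hkp
    have hkt' : t.take k <:+ t :=
      suffix_of_suffix_len _ _ _ hkp h (by rw [hkt]; omega)
    exact suffix_of_suffix_len _ _ _ hkt' (List.drop_suffix 1 t) (by simp [hkt]; omega)
  · intro hkd
    exact (hkd.trans (List.drop_suffix 1 t)).trans h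

-- correctness of the failure-table construction loop in Source B
theorem pre_loop (t : List Int) (ht : t ≠ []) :
    ∀ (cnt j : Nat) (F : List Nat) (q : Nat),
    1 ≤ j → j + cnt = t.length → F.length = t.length + 1 →
    (∀ i, 1 ≤ i → i ≤ j → F.getD i 0 = brd t i) →
    q = bm t ((t.drop 1).take (j-1)) (t.length - 1) →
    (∀ i, 1 ≤ i → i ≤ t.length →
      ((List.range' j cnt).foldl (fun (st : List Nat × Nat) j' =>
          let q' := pyStep t st.1 (t.getD j' 0) (st.2 + 1) st.2
          (st.1.set (j'+1) q', q')) (F, q)).1.getD i 0 = brd t i) := by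
  have hm : 1 ≤ t.length := by cases t <;> simp_all
  intro cnt
  induction cnt with
  | zero =>
    intro j F q h1 h2 h3 h4 h5 i hi1 hi2
    simpa using h4 i hi1 (by omega)
  | succ cnt ih =>
    intro j F q h1 h2 h3 h4 h5 i hi1 hi2
    rw [List.range'_succ, List.foldl_cons]
    have hjm : j < t.length := by omega
    have hql : q ≤ j - 1 := by
      have hs := bm_suffix t ((t.drop 1).take (j-1)) (t.length - 1)
      rw [← h5] at hs
      have := hs.length_le
      have hq1 : q ≤ t.length - 1 := h5 ▸ bm_le ..
      simp only [List.length_take, List.length_drop] at this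
      omega
    have hstep : pyStep t F (t.getD j 0) (q + 1) q
        = bm t ((t.drop 1).take (j-1) ++ [t.getD j 0]) t.length := by
      apply pyStep_spec t F _ _ ht (q+1) q (by omega)
      · intro i' hi1' hi2'
        exact h4 i' hi1' (by omega)
      · exact h5 ▸ bm_suffix ..
      · exact h5 ▸ bm_le ..
      · exact fun k hk1 hk2 hk => by
          have := hb_of_bm t ((t.drop 1).take (j-1)) (t.getD j 0) k hk1 hk2 hk
          omega
    have hpx : (t.drop 1).take (j-1) ++ [t.getD j 0] = (t.drop 1).take j := by
      rw [List.getD_eq_getElem t 0 hjm]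
      conv_rhs => rw [show j = (j-1)+1 by omega]
      rw [List.take_add_one]
      congr 1
      have : (t.drop 1)[j-1]? = t[j]? := by
        rw [List.getElem?_drop, show 1 + (j-1) = j by omega]
      rw [this, List.getElem?_eq_getElem hjm]
      simp
    have hne : bm t ((t.drop 1).take j) t.length ≠ t.length := by
      intro h
      have hs := (bm_eq_top_iff ..).mp h
      rw [List.take_length] at hs
      have := hs.length_le
      simp only [List.length_take, List.length_drop] at this
      omega
    have hcap : bm t ((t.drop 1).take j) t.length
        = bm t ((t.drop 1).take j) (t.length - 1) := by
      have h' := bm_ne_top t ((t.drop 1).take j) (t.length - 1)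
      rw [show t.length - 1 + 1 = t.length by omega] at h'
      exact h' hne
    simp only []
    rw [hstep, hpx, hcap]
    apply ih (j+1) _ _ (by omega) (by omega) (by simpa using h3) _ _ i hi1 hi2
    · intro i' hi1' hi2'
      by_cases hij : i' = j + 1
      · subst hij
        rw [List.getD_eq_getElem?_getD, List.getElem?_set_self (by omega)]
        simp only [Option.getD_some]
        unfold brd
        rw [List.drop_take, Nat.add_sub_cancel]
      · rw [List.getD_eq_getElem?_getD, List.getElem?_set_ne (fun h => hij h.symm),
            ← List.getD_eq_getElem?_getD]
        exact h4 i' hi1' (by omega)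
    · rw [Nat.add_sub_cancel]

-- the number of occurrences of t in a, counted by end position
def occCnt (t a : List Int) : Nat :=
  (List.range (a.length + 1)).countP (fun e => decide (t <:+ a.take e))

-- ============ B side: the per-array loop ============

theorem alt_loop (t : List Int) (ht : t ≠ []) (F : List Nat)
    (hF : ∀ i, 1 ≤ i → i ≤ t.length → F.getD i 0 = brd t i) (a : List Int) :
    ∀ (p : List Int) (c : Int),
    a.foldl (fun (st : Int × Nat) x =>
        let q := pyStep t F x (st.2 + 1) st.2
        if q = t.length then (st.1 + 1, F.getD t.length 0)
        else (st.1, q))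
      (c, bm t p (t.length - 1))
    = (c + ((List.range a.length).countP
              (fun i => decide (t <:+ p ++ a.take (i+1))) : Int),
       bm t (p ++ a) (t.length - 1)) := by
  have hm : 1 ≤ t.length := by cases t <;> simp_all
  induction a with
  | nil => intro p c; simp
  | cons x a' ih =>
    intro p c
    set f := (fun (st : Int × Nat) x =>
        let q := pyStep t F x (st.2 + 1) st.2
        if q = t.length then (st.1 + 1, F.getD t.length 0)
        else (st.1, q)) with hf
    rw [List.foldl_cons]
    have hstep : f (c, bm t p (t.length - 1)) x
        = ((if t <:+ p ++ [x] then c + 1 else c), bm t (p ++ [x]) (t.length - 1)) := by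
      rw [hf]
      have hext : pyStep t F x (bm t p (t.length - 1) + 1) (bm t p (t.length - 1))
          = bm t (p ++ [x]) t.length := by
        apply pyStep_spec t F p x ht _ _ (by omega)
        · intro i hi1 hi2
          exact hF i hi1 (by have := bm_le t p (t.length - 1); omega)
        · exact bm_suffix ..
        · exact bm_le ..
        · exact hb_of_bm t p x
      have hreset : F.getD t.length 0 = bm t (t.drop 1) (t.length - 1) := by
        rw [hF t.length (by omega) le_rfl]
        unfold brd
        rw [List.take_length]
      simp only []
      rw [hext, hreset]
      by_cases hfull : bm t (p ++ [x]) t.length = t.length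
      · have hsuf : t <:+ p ++ [x] := by
          have := (bm_eq_top_iff t (p ++ [x]) t.length).mp hfull
          rwa [List.take_length] at this
        rw [if_pos hfull, if_pos hsuf, ← bm_reset t (p ++ [x]) ht hsuf]
      · have hsuf : ¬ t <:+ p ++ [x] := fun h =>
          hfull ((bm_eq_top_iff t (p ++ [x]) t.length).mpr (by rwa [List.take_length]))
        rw [if_neg hfull, if_neg hsuf]
        have h1 : bm t (p ++ [x]) t.length = bm t (p ++ [x]) (t.length - 1) := by
          have := bm_ne_top t (p ++ [x]) (t.length - 1)
          rw [show t.length - 1 + 1 = t.length by omega] at this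
          exact this hfull
        rw [h1]
    rw [hstep, hf]
    have hcount : ((List.range (a'.length + 1)).countP
          (fun i => decide (t <:+ p ++ (x :: a').take (i+1))) : Int)
        = (if t <:+ p ++ [x] then 1 else 0)
          + ((List.range a'.length).countP
              (fun i => decide (t <:+ (p ++ [x]) ++ a'.take (i+1))) : Int) := by
      rw [List.range_succ_eq_map, List.countP_cons, List.countP_map]
      have hrest : ((List.range a'.length).countP
            ((fun i => decide (t <:+ p ++ (x :: a').take (i+1))) ∘ Nat.succ))
          = (List.range a'.length).countP
              (fun i => decide (t <:+ (p ++ [x]) ++ a'.take (i+1))) := by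
        apply List.countP_congr
        intro i _
        simp [Function.comp, List.take_succ_cons, List.append_assoc]
      rw [hrest]
      by_cases hsuf : t <:+ p ++ [x]
      · simp [hsuf]; ring
      · simp [hsuf]
    by_cases hsuf : t <:+ p ++ [x]
    · rw [if_pos hsuf, ih (p ++ [x]) (c + 1)]
      refine Prod.ext ?_ ?_
      · show c + 1 + _ = c + _
        rw [show ((x :: a').length = a'.length + 1) from rfl, hcount, if_pos hsuf]
        ring
      · show bm t (p ++ [x] ++ a') _ = bm t (p ++ x :: a') _
        rw [List.append_assoc]; rfl
    · rw [if_neg hsuf, ih (p ++ [x]) c]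
      refine Prod.ext ?_ ?_
      · show c + _ = c + _
        rw [show ((x :: a').length = a'.length + 1) from rfl, hcount, if_neg hsuf]
        ring
      · show bm t (p ++ [x] ++ a') _ = bm t (p ++ x :: a') _
        rw [List.append_assoc]; rfl

theorem alt_per_array (t : List Int) (ht : t ≠ []) (F : List Nat)
    (hF : ∀ i, 1 ≤ i → i ≤ t.length → F.getD i 0 = brd t i) (a : List Int) (c : Int) :
    (a.foldl (fun (st : Int × Nat) x =>
        let q := pyStep t F x (st.2 + 1) st.2
        if q = t.length then (st.1 + 1, F.getD t.length 0)
        else (st.1, q))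
      (c, 0)).1 = c + (occCnt t a : Int) := by
  rw [show ((c, (0:Nat)) : Int × Nat) = (c, bm t [] (t.length - 1)) from by
    rw [bm_nil t ht]]
  rw [alt_loop t ht F hF a [] c]
  show c + _ = c + _
  congr 2
  unfold occCnt
  rw [List.range_succ_eq_map, List.countP_cons, List.countP_map]
  have h0' : (decide (t <:+ List.take 0 a) : Bool) = false := by
    simp only [List.take_zero, List.suffix_nil, decide_eq_false_iff_not]
    intro h; exact ht h
  rw [h0']
  rw [if_neg (show ¬(false = true) by simp), Nat.add_zero]
  apply List.countP_congr
  intro i _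
  simp [Function.comp, List.nil_append]

-- ============ A side: the per-array count ============

theorem a_inner_count (a t : List Int) (c : Int) :
    (PySem.List.pyRange 0 (PySem.List.len a - PySem.List.len t + 1) 1).foldl
      (fun count i =>
        if PySem.List.slice a (some i) (some (i + PySem.List.len t)) = t
        then count + 1 else count) c
    = c + ((List.range (a.length + 1 - t.length)).countP
        (fun k => decide ((a.drop k).take t.length = t)) : Int) := by
  rw [PySem.List.foldl_ite_add_one
    (p := fun i => PySem.List.slice a (some i) (some (i + PySem.List.len t)) = t)]
  congr 2
  rw [PySem.List.pyRange_one, List.countP_map]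
  simp only [PySem.List.len_eq, Int.sub_zero]
  have hn : ((a.length : Int) - t.length + 1).toNat = a.length + 1 - t.length := by omega
  rw [hn]
  apply List.countP_congr
  intro k _
  simp [Function.comp, PySem.List.slice_natCast_add]

theorem a_count_eq_occCnt (a t : List Int) :
    (List.range (a.length + 1 - t.length)).countP
        (fun k => decide ((a.drop k).take t.length = t))
    = occCnt t a := by
  unfold occCnt
  by_cases hm : t.length ≤ a.length + 1
  · rw [show a.length + 1 = t.length + (a.length + 1 - t.length) by omega, List.range_add,
        List.countP_append, List.countP_map]
    have h1 : (List.range t.length).countP (fun e => decide (t <:+ a.take e)) = 0 := by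
      apply List.countP_eq_zero.mpr
      intro e he
      rw [List.mem_range] at he
      simp only [decide_eq_true_eq]
      intro hsuf
      have := hsuf.length_le
      simp at this; omega
    rw [h1, Nat.zero_add]
    rw [show t.length + (a.length + 1 - t.length) - t.length = a.length + 1 - t.length by omega]
    apply List.countP_congr
    intro k hk
    rw [List.mem_range] at hk
    simp only [Function.comp, decide_eq_true_eq]
    constructor
    · intro hkt
      rw [List.suffix_iff_eq_drop]
      have hlen : (a.take (t.length + k)).length = t.length + k := by simp; omega
      rw [hlen, Nat.add_sub_cancel_left, List.drop_take,
          show t.length + k - k = t.length by omega]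
      exact hkt.symm
    · intro hsuf
      rw [List.suffix_iff_eq_drop] at hsuf
      have hlen : (a.take (t.length + k)).length = t.length + k := by simp; omega
      rw [hlen, Nat.add_sub_cancel_left, List.drop_take,
          show t.length + k - k = t.length by omega] at hsuf
      exact hsuf.symm
  · rw [show a.length + 1 - t.length = 0 by omega]
    simp only [List.range_zero, List.countP_nil]
    symm
    apply List.countP_eq_zero.mpr
    intro e he
    rw [List.mem_range] at he
    simp only [decide_eq_true_eq]
    intro hsuf
    have := hsuf.length_le
    simp at this; omega

-- ============ putting both sides together ============

theorem a_eq_sum (arrays : List (List Int)) (t : List Int) :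
    count_included_subarrays arrays t
    = (arrays.map (fun a => (occCnt t a : Int))).sum := by
  unfold count_included_subarrays
  rw [PySem.List.foldl_congr_mem' arrays _
    (fun count array => count + (occCnt t array : Int)) 0
    (fun x _ acc => by rw [a_inner_count x t acc, a_count_eq_occCnt x t])]
  rw [PySem.List.foldl_add]
  ring

theorem occCnt_nil_target (a : List Int) : occCnt [] a = a.length + 1 := by
  unfold occCnt
  rw [List.countP_eq_length.mpr (fun e _ => by simp)]
  simp

-- ===== VERDICT (by name: the statement is the Claim_ definition above) =====
theorem count_included_subarrays_spec : Claim_equal_count_included_subarrays := by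
  intro arrays t _
  unfold Spec_count_included_subarrays count_included_subarrays_alt
  rw [a_eq_sum]
  by_cases h0 : t.length = 0
  · rw [if_pos h0]
    have ht : t = [] := List.length_eq_zero_iff.mp h0
    subst ht
    congr 1
    apply List.map_congr_left
    intro a _
    rw [occCnt_nil_target]
    simp [PySem.List.len_eq]
  · rw [if_neg h0]
    have ht : t ≠ [] := by intro h; subst h; simp at h0
    have hm : 1 ≤ t.length := by cases t <;> simp_all
    have hF : ∀ i, 1 ≤ i → i ≤ t.length →
        ((List.range' 1 (t.length - 1)).foldl (fun (st : List Nat × Nat) j =>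
            let q := pyStep t st.1 (t.getD j 0) (st.2 + 1) st.2
            (st.1.set (j+1) q, q)) (List.replicate (t.length + 1) 0, 0)).1.getD i 0
          = brd t i := by
      apply pre_loop t ht (t.length - 1) 1 _ 0 le_rfl (by omega) (by simp)
      · intro i hi1 hi2
        have hi : i = 1 := by omega
        subst hi
        rw [show ((List.replicate (t.length + 1) 0).getD 1 0 = 0) from by
          simp [List.getD_eq_getElem?_getD]]
        unfold brd
        have h1 : (t.take 1).drop 1 = [] := by
          cases t <;> simp_all
        rw [h1, bm_nil t ht]
      · simp [bm_nil t ht]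
    simp only []
    rw [PySem.List.foldl_congr_mem' arrays _
      (fun total array => total + (occCnt t array : Int)) 0
      (fun x _ acc => alt_per_array t ht _ hF x acc)]
    rw [PySem.List.foldl_add]
    ring
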